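-- pv_equiv track=rewrite | github.com/scribe-project/asr-standardized-combined | asr_standardized_combined/standardize/utils.py | out_of_alphabet
-- ===== SOURCE A (Python) =====
-- def out_of_alphabet(transcription_list, alphabet):
--     """
--     Given a list of transcriptions (strings) and an alphabet (list of strings)
--     identifies characters, words, sentences, and sentence indices that contain
--     characters outside the given alphabet.
--
--     Parameters
--     ----------
--     transcription_list: list of strings
--         List of transcriptions that we wish to analyze
--     alphabet: list of strings
--         List of characters that conforms the allowed alphabet (default is
--         'a b c d e f g h i j k l m n o p q r s t u v w x y z å ø æ - é –'.split())
--
--     Returns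
--     -------
--     Tuple with four lists of equal length:
--
--     del_letters: list of strings
--         List of characters outside the given alphabet
--     del_words: list of strings
--         List of words (tokens separated by a space) that contain one or more characters
--         outside the given alphabet
--     del_sentences: list of strings
--         Subset of sentences from transcription_list that contain one or more characters
--         outside the given alphabet
--     index_sentence: list of integers
--         List of integers indicating the index positions from transcription_list that
--         contain one or more characters outside the given alphabet
--     """
--     del_letters = []
--     del_words = []
--     index_sentence = []
--     del_sentences = []
--
--     for (i,x) in enumerate(transcription_list):
--         for y in x.lower().split(): # this makes that only transcriptions in lower case work
--             chars = list(y)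
--             for letter in chars:
--                 if letter not in alphabet:
--                     if letter not in del_letters:
--                         del_letters.append(letter)
--                     if y not in del_words:
--                         del_words.append(y)
--                     if i not in index_sentence:
--                         index_sentence.append(i)
--                         del_sentences.append(x)
--
--     return del_letters, del_words, del_sentences, index_sentence
-- ===== SOURCE B (Python) =====
-- def out_of_alphabet(transcription_list, alphabet):
--     # Declarative staged pipeline: precompute a word-list table, then derive each of
--     # the four outputs by an independent comprehension, with one final order-preserving
--     # dedup -- instead of A's single nested loop mutating four coupled accumulators.
--     allowed = set(alphabet)
--
--     def word_bad(y):
--         return any(c not in allowed for c in y)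
--
--     word_lists = [x.lower().split() for x in transcription_list]
--     bad_letters = [c for ws in word_lists for y in ws for c in y if c not in allowed]
--     bad_words = [y for ws in word_lists for y in ws if word_bad(y)]
--     flagged = [(i, x) for i, (x, ws) in enumerate(zip(transcription_list, word_lists))
--                if any(word_bad(y) for y in ws)]
--     index_sentence = [i for i, _ in flagged]
--     del_sentences = [x for _, x in flagged]
--     return (list(dict.fromkeys(bad_letters)), list(dict.fromkeys(bad_words)),
--             del_sentences, index_sentence)
-- ===== Notes on version B (the rewrite author's own statement) =====
-- stated objective: faster
-- what changed: Replaces A's single nested loop that mutates four coupled accumulators (with per-letter membership scans of the growing result lists) by a declarative staged pipeline: precompute the word-list table, derive each of the four outputs by an independent comprehension (flat letter list, flat word list, flagged (index, sentence) pairs via enumerate+zip), then one final order-preserving dedup with dict.fromkeys.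
import Mathlib
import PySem

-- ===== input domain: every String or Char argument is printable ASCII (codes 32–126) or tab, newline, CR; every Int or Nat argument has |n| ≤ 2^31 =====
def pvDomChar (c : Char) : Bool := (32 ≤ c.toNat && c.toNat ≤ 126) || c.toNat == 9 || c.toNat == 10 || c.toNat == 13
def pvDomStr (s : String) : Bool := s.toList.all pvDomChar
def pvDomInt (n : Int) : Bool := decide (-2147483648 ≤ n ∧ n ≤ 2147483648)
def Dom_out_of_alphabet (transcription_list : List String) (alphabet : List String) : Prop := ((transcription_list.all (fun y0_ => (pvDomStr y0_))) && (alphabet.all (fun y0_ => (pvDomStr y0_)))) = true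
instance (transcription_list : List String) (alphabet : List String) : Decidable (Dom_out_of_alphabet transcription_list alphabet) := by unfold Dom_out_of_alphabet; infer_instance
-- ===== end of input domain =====

-- B replaces A's single nested loop that mutates four coupled accumulators (with per-letter
-- membership tests into the growing results) by a declarative staged pipeline: a precomputed
-- word-list table, four independent comprehensions, and one final order-preserving dedup.

-- 'x.lower().split()' (shared by both ports)
def pvWords (x : String) : List String := PySem.Str.split₀ (PySem.Str.lower x)

-- ===== PORT A =====
-- innermost loop body: 'for letter in chars: if letter not in alphabet: …'
def pvStepLetterA (alphabet : List String) (i : Int) (x y : String)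
    (s : List String × List String × List String × List Int) (letter : Char) :
    List String × List String × List String × List Int :=
  if letter.toString ∈ alphabet then s
  else
    let dl := if letter.toString ∈ s.1 then s.1 else s.1 ++ [letter.toString]
    let dw := if y ∈ s.2.1 then s.2.1 else s.2.1 ++ [y]
    if i ∈ s.2.2.2 then (dl, dw, s.2.2.1, s.2.2.2)
    else (dl, dw, s.2.2.1 ++ [x], s.2.2.2 ++ [i])

-- 'chars = list(y); for letter in chars: …'
def pvStepWordA (alphabet : List String) (i : Int) (x : String)
    (s : List String × List String × List String × List Int) (y : String) :
    List String × List String × List String × List Int :=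
  y.toList.foldl (pvStepLetterA alphabet i x y) s

-- 'for y in x.lower().split(): …'
def pvStepSentA (alphabet : List String)
    (s : List String × List String × List String × List Int) (p : Int × String) :
    List String × List String × List String × List Int :=
  (pvWords p.2).foldl (pvStepWordA alphabet p.1 p.2) s

def out_of_alphabet (transcription_list : List String) (alphabet : List String) :
    List String × List String × List String × List Int :=
  (PySem.List.enumerate transcription_list 0).foldl (pvStepSentA alphabet) ([], [], [], [])

-- ===== PORT B =====
-- 'word_bad(y) = any(c not in allowed for c in y)'
def pvWordBad (allowed : PySem.Set String) (y : String) : Bool :=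
  y.toList.any (fun c => !(PySem.Set.contains allowed c.toString))

def out_of_alphabet_alt (transcription_list : List String) (alphabet : List String) :
    List String × List String × List String × List Int :=
  let allowed := PySem.Set.ofList alphabet
  -- word_lists = [x.lower().split() for x in transcription_list]
  let wordLists := transcription_list.map pvWords
  -- bad_letters = [c for ws in word_lists for y in ws for c in y if c not in allowed]
  let badLetters := wordLists.flatMap (fun ws => ws.flatMap (fun y =>
    (y.toList.filter (fun c => !(PySem.Set.contains allowed c.toString))).map Char.toString))
  -- bad_words = [y for ws in word_lists for y in ws if word_bad(y)]
  let badWords := wordLists.flatMap (fun ws => ws.filter (pvWordBad allowed))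
  -- flagged = [(i, x) for i, (x, ws) in enumerate(zip(transcription_list, word_lists)) if any(word_bad(y) for y in ws)]
  let flagged := (PySem.List.enumerate (transcription_list.zip wordLists) 0).filter
    (fun p => p.2.2.any (pvWordBad allowed))
  (PySem.List.dedup badLetters, PySem.List.dedup badWords,
   flagged.map (fun p => p.2.1), flagged.map (fun p => p.1))

-- ===== PRECONDITION & SPEC =====
def Spec_out_of_alphabet (transcription_list : List String) (alphabet : List String) (out : List String × List String × List String × List Int) : Prop := out = out_of_alphabet_alt transcription_list alphabet
instance (transcription_list : List String) (alphabet : List String) (out : List String × List String × List String × List Int) : Decidable (Spec_out_of_alphabet transcription_list alphabet out) := by unfold Spec_out_of_alphabet; infer_instance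

-- ===== CLAIM (what is proved, stated in full; the proofs are below) =====
def Claim_equal_out_of_alphabet : Prop := ∀ (transcription_list : List String) (alphabet : List String), Dom_out_of_alphabet transcription_list alphabet → Spec_out_of_alphabet transcription_list alphabet (out_of_alphabet transcription_list alphabet)

-- ===== LEMMAS AND PROOFS =====

-- first-seen insertion (A's on-the-fly dedup step)
def pvIns (s : List String) (a : String) : List String := if a ∈ s then s else s ++ [a]

-- the out-of-alphabet letters of a word, as 1-char strings, in order
def pvBad (alphabet : List String) (y : String) : List String :=
  (y.toList.filter (fun c => decide (c.toString ∉ alphabet))).map Char.toString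

-- the bad sentences and their indices, from position n on
def pvSent (alphabet : List String) : List String → Int → List String × List Int
  | [], _ => ([], [])
  | x :: t, n =>
    let r := pvSent alphabet t (n + 1)
    if ∀ y ∈ pvWords x, pvBad alphabet y = [] then r else (x :: r.1, n :: r.2)

lemma pvIns_mem_self (s : List String) (a : String) : a ∈ pvIns s a := by
  unfold pvIns; split_ifs with h
  · exact h
  · simp

lemma pvIns_idem (s : List String) (a : String) : pvIns (pvIns s a) a = pvIns s a := by
  have h := pvIns_mem_self s a
  unfold pvIns at *
  simp [h]

lemma letters_A (alphabet : List String) (i : Int) (x y : String) (cs : List Char)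
    (s : List String × List String × List String × List Int) :
    cs.foldl (pvStepLetterA alphabet i x y) s =
      (((cs.filter (fun c => decide (c.toString ∉ alphabet))).map Char.toString).foldl pvIns s.1,
       if (cs.filter (fun c => decide (c.toString ∉ alphabet))).map Char.toString = [] then s.2.1 else pvIns s.2.1 y,
       if ((cs.filter (fun c => decide (c.toString ∉ alphabet))).map Char.toString = []) ∨ i ∈ s.2.2.2 then s.2.2.1 else s.2.2.1 ++ [x],
       if ((cs.filter (fun c => decide (c.toString ∉ alphabet))).map Char.toString = []) ∨ i ∈ s.2.2.2 then s.2.2.2 else s.2.2.2 ++ [i]) := by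
  induction cs generalizing s with
  | nil => simp
  | cons c cs ih =>
    rw [List.foldl_cons]
    by_cases hc : c.toString ∈ alphabet
    · have hstep : pvStepLetterA alphabet i x y s c = s := by
        unfold pvStepLetterA
        rw [if_pos hc]
      have hd : (decide (c.toString ∉ alphabet)) = false := decide_eq_false (not_not_intro hc)
      rw [hstep, ih, List.filter_cons, hd]
      simp only [Bool.false_eq_true, if_false]
    · have hd : (decide (c.toString ∉ alphabet)) = true := decide_eq_true hc
      have hstep : pvStepLetterA alphabet i x y s c =
          (pvIns s.1 c.toString, pvIns s.2.1 y,
           (if i ∈ s.2.2.2 then s.2.2.1 else s.2.2.1 ++ [x]),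
           (if i ∈ s.2.2.2 then s.2.2.2 else s.2.2.2 ++ [i])) := by
        unfold pvStepLetterA pvIns
        rw [if_neg hc]
        split_ifs <;> rfl
      rw [hstep, ih, List.filter_cons, hd, if_pos rfl, List.map_cons, List.foldl_cons]
      by_cases hi : i ∈ s.2.2.2 <;>
        simp [hi, pvIns_idem]

lemma word_A (alphabet : List String) (i : Int) (x : String)
    (s : List String × List String × List String × List Int) (y : String) :
    pvStepWordA alphabet i x s y =
      ((pvBad alphabet y).foldl pvIns s.1,
       if pvBad alphabet y = [] then s.2.1 else pvIns s.2.1 y,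
       if pvBad alphabet y = [] ∨ i ∈ s.2.2.2 then s.2.2.1 else s.2.2.1 ++ [x],
       if pvBad alphabet y = [] ∨ i ∈ s.2.2.2 then s.2.2.2 else s.2.2.2 ++ [i]) :=
  letters_A alphabet i x y y.toList s

lemma words_A (alphabet : List String) (i : Int) (x : String) (ws : List String)
    (s : List String × List String × List String × List Int) :
    ws.foldl (pvStepWordA alphabet i x) s =
      ((ws.flatMap (pvBad alphabet)).foldl pvIns s.1,
       (ws.filter (fun y => decide (pvBad alphabet y ≠ []))).foldl pvIns s.2.1,
       if (∀ y ∈ ws, pvBad alphabet y = []) ∨ i ∈ s.2.2.2 then s.2.2.1 else s.2.2.1 ++ [x],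
       if (∀ y ∈ ws, pvBad alphabet y = []) ∨ i ∈ s.2.2.2 then s.2.2.2 else s.2.2.2 ++ [i]) := by
  induction ws generalizing s with
  | nil => simp
  | cons y ws ih =>
    rw [List.foldl_cons, word_A, ih, List.flatMap_cons, List.filter_cons, List.foldl_append]
    by_cases hb : pvBad alphabet y = []
    · simp [hb]
    · by_cases hi : i ∈ s.2.2.2 <;>
        simp [hb, hi]

lemma sent_A (alphabet : List String) (tl : List String) (n : Int)
    (s : List String × List String × List String × List Int)
    (h : ∀ j ∈ s.2.2.2, j < n) :
    (PySem.List.enumerate tl n).foldl (pvStepSentA alphabet) s =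
      ((tl.flatMap (fun x => (pvWords x).flatMap (pvBad alphabet))).foldl pvIns s.1,
       (tl.flatMap (fun x => (pvWords x).filter (fun y => decide (pvBad alphabet y ≠ [])))).foldl pvIns s.2.1,
       s.2.2.1 ++ (pvSent alphabet tl n).1,
       s.2.2.2 ++ (pvSent alphabet tl n).2) := by
  induction tl generalizing n s with
  | nil => simp [pvSent, PySem.List.enumerate_nil]
  | cons x tl ih =>
    rw [PySem.List.enumerate_cons, List.foldl_cons]
    have hn : n ∉ s.2.2.2 := fun hmem => absurd (h n hmem) (lt_irrefl n)
    by_cases hall : ∀ y ∈ pvWords x, pvBad alphabet y = []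
    · have hstep : pvStepSentA alphabet s (n, x) =
          (((pvWords x).flatMap (pvBad alphabet)).foldl pvIns s.1,
           ((pvWords x).filter (fun y => decide (pvBad alphabet y ≠ []))).foldl pvIns s.2.1,
           s.2.2.1, s.2.2.2) := by
        unfold pvStepSentA
        rw [words_A, if_pos (Or.inl hall), if_pos (Or.inl hall)]
      rw [hstep,
        ih (n + 1)
          (((pvWords x).flatMap (pvBad alphabet)).foldl pvIns s.1,
           ((pvWords x).filter (fun y => decide (pvBad alphabet y ≠ []))).foldl pvIns s.2.1,
           s.2.2.1, s.2.2.2)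
          (fun j hj => lt_trans (h j hj) (by omega))]
      simp only [pvSent, List.flatMap_cons, List.foldl_append]
      rw [if_pos hall]
    · have hstep : pvStepSentA alphabet s (n, x) =
          (((pvWords x).flatMap (pvBad alphabet)).foldl pvIns s.1,
           ((pvWords x).filter (fun y => decide (pvBad alphabet y ≠ []))).foldl pvIns s.2.1,
           s.2.2.1 ++ [x], s.2.2.2 ++ [n]) := by
        unfold pvStepSentA
        rw [words_A, if_neg (by simp [hall, hn]), if_neg (by simp [hall, hn])]
      rw [hstep,
        ih (n + 1)
          (((pvWords x).flatMap (pvBad alphabet)).foldl pvIns s.1,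
           ((pvWords x).filter (fun y => decide (pvBad alphabet y ≠ []))).foldl pvIns s.2.1,
           s.2.2.1 ++ [x], s.2.2.2 ++ [n])
          (fun j hj => by
            rcases List.mem_append.mp hj with hj' | hj'
            · exact lt_trans (h j hj') (by omega)
            · simp at hj'
              omega)]
      simp only [pvSent, List.flatMap_cons, List.foldl_append]
      rw [if_neg hall]
      simp [List.append_assoc]

-- B's per-letter filter equals pvBad
lemma badB_eq (alphabet : List String) (y : String) :
    (y.toList.filter (fun c => !(PySem.Set.contains (PySem.Set.ofList alphabet) c.toString))).map Char.toString
      = pvBad alphabet y := by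
  unfold pvBad
  congr 1
  apply List.filter_congr
  intro c _
  simp [PySem.Set.contains, PySem.Set.mem_ofList]

-- B's word_bad equals "pvBad is nonempty"
lemma wordBad_eq (alphabet : List String) (y : String) :
    pvWordBad (PySem.Set.ofList alphabet) y = decide (pvBad alphabet y ≠ []) := by
  unfold pvWordBad pvBad
  rw [Bool.eq_iff_iff]
  simp [List.any_eq_true, List.filter_eq_nil_iff, List.map_eq_nil_iff,
    PySem.Set.contains, PySem.Set.mem_ofList]

-- B's sentence condition vs the "all words clean" test
lemma sentBad_eq (alphabet : List String) (ws : List String) :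
    ws.any (pvWordBad (PySem.Set.ofList alphabet)) = decide (¬ ∀ y ∈ ws, pvBad alphabet y = []) := by
  rw [Bool.eq_iff_iff]
  simp [List.any_eq_true, wordBad_eq]

-- B's flagged list projects to pvSent
lemma flagged_eq (alphabet : List String) (tl : List String) (n : Int) :
    (((PySem.List.enumerate (tl.zip (tl.map pvWords)) n).filter
        (fun p => p.2.2.any (pvWordBad (PySem.Set.ofList alphabet)))).map (fun p => p.2.1),
     ((PySem.List.enumerate (tl.zip (tl.map pvWords)) n).filter
        (fun p => p.2.2.any (pvWordBad (PySem.Set.ofList alphabet)))).map (fun p => p.1))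
      = pvSent alphabet tl n := by
  induction tl generalizing n with
  | nil => simp [pvSent, PySem.List.enumerate_nil]
  | cons x tl ih =>
    simp only [List.map_cons, List.zip_cons_cons]
    rw [PySem.List.enumerate_cons, List.filter_cons]
    dsimp only
    rw [sentBad_eq]
    by_cases hall : ∀ y ∈ pvWords x, pvBad alphabet y = []
    · rw [if_neg (by simpa using hall)]
      rw [show pvSent alphabet (x :: tl) n = pvSent alphabet tl (n + 1) from by
        simp only [pvSent]; rw [if_pos hall]]
      exact ih (n + 1)
    · rw [if_pos (by simpa using hall)]
      rw [show pvSent alphabet (x :: tl) n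
            = (x :: (pvSent alphabet tl (n + 1)).1, n :: (pvSent alphabet tl (n + 1)).2) from by
        simp only [pvSent]; rw [if_neg hall]]
      have h := ih (n + 1)
      rw [Prod.ext_iff] at h
      simp only [List.map_cons, Prod.mk.injEq, List.cons.injEq]
      exact ⟨⟨trivial, h.1⟩, trivial, h.2⟩

lemma ofList_eq_foldl_pvIns (l : List String) :
    PySem.Set.ofList l = l.foldl pvIns [] := by
  rw [PySem.Set.ofList_eq_foldl]
  have hadd : (PySem.Set.add : PySem.Set String → String → PySem.Set String) = pvIns := by
    funext s a
    simp [PySem.Set.add, pvIns]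
  rw [hadd]

-- ===== VERDICT (by name: the statement is the Claim_ definition above) =====
theorem out_of_alphabet_spec : Claim_equal_out_of_alphabet := by
  intro tl al _
  unfold Spec_out_of_alphabet out_of_alphabet out_of_alphabet_alt
  dsimp only
  rw [sent_A al tl 0 ([], [], [], []) (by simp)]
  have h1 : ((tl.map pvWords).flatMap (fun ws => ws.flatMap (fun y =>
      (y.toList.filter (fun c => !(PySem.Set.contains (PySem.Set.ofList al) c.toString))).map Char.toString)))
      = tl.flatMap (fun x => (pvWords x).flatMap (pvBad al)) := by
    rw [List.flatMap_map]
    simp only [badB_eq]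
  have h2 : ((tl.map pvWords).flatMap (fun ws => ws.filter (pvWordBad (PySem.Set.ofList al))))
      = tl.flatMap (fun x => (pvWords x).filter (fun y => decide (pvBad al y ≠ []))) := by
    rw [List.flatMap_map]
    congr 1
    funext x
    exact List.filter_congr (fun y _ => wordBad_eq al y)
  have h3a : (((PySem.List.enumerate (tl.zip (tl.map pvWords)) 0).filter
      (fun p => p.2.2.any (pvWordBad (PySem.Set.ofList al)))).map (fun p => p.2.1))
      = (pvSent al tl 0).1 := congrArg Prod.fst (flagged_eq al tl 0)
  have h3b : (((PySem.List.enumerate (tl.zip (tl.map pvWords)) 0).filter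
      (fun p => p.2.2.any (pvWordBad (PySem.Set.ofList al)))).map (fun p => p.1))
      = (pvSent al tl 0).2 := congrArg Prod.snd (flagged_eq al tl 0)
  rw [List.nil_append, List.nil_append, ← h3a, ← h3b, h1, h2,
    PySem.List.dedup_eq_ofList, PySem.List.dedup_eq_ofList]
  exact Prod.ext (ofList_eq_foldl_pvIns _).symm
    (Prod.ext (ofList_eq_foldl_pvIns _).symm rfl)
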